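-- pv_equiv track=rewrite | github.com/NastyRu/Modeling | semestr2/lab1/main.py | get_table_number
-- ===== SOURCE A (Python) =====
-- def get_table_number(table, i, j, num, count):
--     res = []
--     for c in range(count):
--         res_v = 0
--         num_v = num
--         while (num_v > 0):
--             ost = j % 5
--             if (1 == ost):
--                 res_p = int(table[i - 1][j // 5]) // pow(10, 4)
--             elif (2 == ost):
--                 res_p = int(table[i - 1][j // 5]) // pow(10, 3) % 10
--             elif (3 == ost):
--                 res_p = int(table[i - 1][j // 5]) // pow(10, 2) % 10
--             elif (4 == ost):
--                 res_p = int(table[i - 1][j // 5]) // pow(10, 1) % 10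
--             else:
--                 res_p = int(table[i - 1][j // 5 - 1]) % 10
--             num_v -= 1
--             res_v = res_v * 10 + res_p
--             j += 1
--             if (j > 60):
--                 j = 1
--                 i += 1
--             if (i > 60):
--                 i = 1
--         if (res_v < pow(10, num - 1)):
--             res_v += pow(10, num - 1)
--         res.append(res_v)
--     return res
-- ===== SOURCE B (Python) =====
-- def get_table_number(table, i, j, num, count):
--     if count <= 0:
--         return []
--     # Pass 1: walk the (i, j) coordinate once, emitting one digit per step.
--     digits = []
--     for _ in range(num * count):
--         ost = j % 5
--         if ost == 0:
--             d = int(table[i - 1][j // 5 - 1]) % 10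
--         elif ost == 1:
--             d = int(table[i - 1][j // 5]) // 10 ** 4
--         else:
--             d = int(table[i - 1][j // 5]) // 10 ** (5 - ost) % 10
--         digits.append(d)
--         j += 1
--         if j > 60:
--             j = 1
--             i += 1
--         if i > 60:
--             i = 1
--     # Pass 2: consume the digit stream in chunks of num.
--     lo = 10 ** (num - 1)
--     res = []
--     for _ in range(count):
--         chunk, digits = digits[:num], digits[num:]
--         v = 0
--         for d in chunk:
--             v = v * 10 + d
--         res.append(v + lo if v < lo else v)
--     return res
-- ===== Notes on version B (the rewrite author's own statement) =====
-- stated objective: alternative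
-- what changed: A interleaves everything in one nested loop (per-number digit extraction, coordinate wrapping, accumulation); B is two independent passes: first a single linear walk emitting the flat stream of num*count digits with a 3-way branch on j%5, then a chunking pass that folds each num-sized slice into a number and pads it.
-- outside the precondition, e.g. on get_table_number([[12345]], 1, 1, 1, 1): A returns [1], B returns [1]; on get_table_number([[12345]], 1, 1, 0, 1): A returns [0.1], B returns [0.1]
import Mathlib
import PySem

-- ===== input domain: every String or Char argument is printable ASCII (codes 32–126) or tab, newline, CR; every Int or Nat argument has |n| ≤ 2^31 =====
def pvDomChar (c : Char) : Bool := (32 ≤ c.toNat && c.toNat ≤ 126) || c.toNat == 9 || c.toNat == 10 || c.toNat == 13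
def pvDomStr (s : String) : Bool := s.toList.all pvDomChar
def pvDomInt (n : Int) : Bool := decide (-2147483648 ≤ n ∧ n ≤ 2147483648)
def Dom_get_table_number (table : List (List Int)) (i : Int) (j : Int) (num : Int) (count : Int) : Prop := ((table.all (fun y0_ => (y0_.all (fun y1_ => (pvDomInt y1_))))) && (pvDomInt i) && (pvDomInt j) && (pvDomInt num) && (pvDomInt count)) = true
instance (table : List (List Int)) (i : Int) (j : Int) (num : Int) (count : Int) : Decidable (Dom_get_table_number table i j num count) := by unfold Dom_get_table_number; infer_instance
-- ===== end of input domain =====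

-- B replaces A's interleaved nested loop by two passes: a linear coordinate walk producing the
-- flat digit stream, then a chunking pass folding num-sized slices into numbers (alternative
-- decomposition, same cost). Equivalence is about the return value only.

-- ===== PORT A =====
def gtnA_while (table : List (List Int)) : Nat → Int → Int → Int → Int × Int × Int
  | 0, res_v, i, j => (res_v, i, j)
  | n+1, res_v, i, j =>
    let ost := PySem.Int.mod j 5
    let res_p :=
      if ost = 1 then PySem.Int.floordiv (PySem.List.pyGetD (PySem.List.pyGetD table (i-1) []) (PySem.Int.floordiv j 5) 0) (10 ^ 4)
      else if ost = 2 then PySem.Int.mod (PySem.Int.floordiv (PySem.List.pyGetD (PySem.List.pyGetD table (i-1) []) (PySem.Int.floordiv j 5) 0) (10 ^ 3)) 10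
      else if ost = 3 then PySem.Int.mod (PySem.Int.floordiv (PySem.List.pyGetD (PySem.List.pyGetD table (i-1) []) (PySem.Int.floordiv j 5) 0) (10 ^ 2)) 10
      else if ost = 4 then PySem.Int.mod (PySem.Int.floordiv (PySem.List.pyGetD (PySem.List.pyGetD table (i-1) []) (PySem.Int.floordiv j 5) 0) (10 ^ 1)) 10
      else PySem.Int.mod (PySem.List.pyGetD (PySem.List.pyGetD table (i-1) []) (PySem.Int.floordiv j 5 - 1) 0) 10
    let res_v' := res_v * 10 + res_p
    let j' := j + 1
    let ij : Int × Int := if j' > 60 then (i + 1, 1) else (i, j')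
    let i'' := if ij.1 > 60 then 1 else ij.1
    gtnA_while table n res_v' i'' ij.2

def gtnA_outer (table : List (List Int)) (num : Int) : Nat → List Int → Int → Int → List Int
  | 0, res, _, _ => res
  | c+1, res, i, j =>
    let r := gtnA_while table num.toNat 0 i j
    let res_v := if r.1 < (10:Int) ^ (num - 1).toNat then r.1 + (10:Int) ^ (num - 1).toNat else r.1
    gtnA_outer table num c (res ++ [res_v]) r.2.1 r.2.2

def get_table_number (table : List (List Int)) (i : Int) (j : Int) (num : Int) (count : Int) : List Int :=
  gtnA_outer table num count.toNat [] i j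

-- ===== PORT B =====
def gtnB_digit (table : List (List Int)) (i j : Int) : Int :=
  let ost := PySem.Int.mod j 5
  if ost = 0 then PySem.Int.mod (PySem.List.pyGetD (PySem.List.pyGetD table (i-1) []) (PySem.Int.floordiv j 5 - 1) 0) 10
  else if ost = 1 then PySem.Int.floordiv (PySem.List.pyGetD (PySem.List.pyGetD table (i-1) []) (PySem.Int.floordiv j 5) 0) (10 ^ 4)
  else PySem.Int.mod (PySem.Int.floordiv (PySem.List.pyGetD (PySem.List.pyGetD table (i-1) []) (PySem.Int.floordiv j 5) 0) ((10:Int) ^ (5 - ost).toNat)) 10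

def gtnB_next (i j : Int) : Int × Int :=
  let j' := j + 1
  let ij : Int × Int := if j' > 60 then (i + 1, 1) else (i, j')
  (if ij.1 > 60 then 1 else ij.1, ij.2)

def gtnB_walk (table : List (List Int)) : Nat → Int → Int → List Int
  | 0, _, _ => []
  | n+1, i, j => gtnB_digit table i j :: gtnB_walk table n (gtnB_next i j).1 (gtnB_next i j).2

def gtnB_pack (num lo : Int) : Nat → List Int → List Int
  | 0, _ => []
  | c+1, digits =>
    let chunk := PySem.List.slice digits none (some num)
    let rest := PySem.List.slice digits (some num) none
    let v := chunk.foldl (fun v d => v * 10 + d) 0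
    (if v < lo then v + lo else v) :: gtnB_pack num lo c rest

def get_table_number_alt (table : List (List Int)) (i : Int) (j : Int) (num : Int) (count : Int) : List Int :=
  if count ≤ 0 then []
  else
    let digits := gtnB_walk table (num * count).toNat i j
    gtnB_pack num ((10:Int) ^ (num - 1).toNat) count.toNat digits

-- ===== PRECONDITION & SPEC =====
-- Pre_ excludes inputs where A raises IndexError (tables smaller than the 60×12 layout the
-- wrap-around walk assumes, or start positions outside 1..60) and num ≤ 0 with count ≥ 1, where
-- A returns floats rather than ints; on a few such small-table inputs the walk happens to stay
-- in range and A still returns normally — they are excluded with the rest of that shape.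
def Pre_get_table_number (table : List (List Int)) (i : Int) (j : Int) (num : Int) (count : Int) : Prop :=
  count ≤ 0 ∨ (1 ≤ num ∧ 1 ≤ i ∧ i ≤ 60 ∧ 1 ≤ j ∧ j ≤ 60 ∧ 60 ≤ table.length ∧ ∀ r ∈ table.take 60, 12 ≤ r.length)
instance (table : List (List Int)) (i : Int) (j : Int) (num : Int) (count : Int) : Decidable (Pre_get_table_number table i j num count) := by unfold Pre_get_table_number; infer_instance

def pvWitness_get_table_number : List (List Int) × Int × Int × Int × Int := ([[12345]], 1, 1, 2, 0)

def Spec_get_table_number (table : List (List Int)) (i : Int) (j : Int) (num : Int) (count : Int) (out : List Int) : Prop := out = get_table_number_alt table i j num count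
instance (table : List (List Int)) (i : Int) (j : Int) (num : Int) (count : Int) (out : List Int) : Decidable (Spec_get_table_number table i j num count out) := by unfold Spec_get_table_number; infer_instance

-- ===== CLAIM (what is proved, stated in full; the proofs are below) =====
def Claim_equal_get_table_number : Prop := ∀ (table : List (List Int)) (i : Int) (j : Int) (num : Int) (count : Int), Dom_get_table_number table i j num count → Pre_get_table_number table i j num count → Spec_get_table_number table i j num count (get_table_number table i j num count)

-- ===== LEMMAS AND PROOFS =====

-- coordinate after n steps of the walk (proof-only helper)
def gtnIter : Nat → Int → Int → Int × Int
  | 0, i, j => (i, j)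
  | n+1, i, j => gtnIter n (gtnB_next i j).1 (gtnB_next i j).2

theorem gtn_step (table : List (List Int)) (n : Nat) (res_v i j : Int) :
    gtnA_while table (n+1) res_v i j
      = gtnA_while table n (res_v * 10 + gtnB_digit table i j) (gtnB_next i j).1 (gtnB_next i j).2 := by
  have hm : PySem.Int.mod j 5 = j % 5 := PySem.Int.mod_eq_emod_of_pos (by norm_num)
  have h0 : 0 ≤ j % 5 := Int.emod_nonneg j (by norm_num)
  have h1 : j % 5 < 5 := Int.emod_lt_of_pos j (by norm_num)
  have h : j % 5 = 0 ∨ j % 5 = 1 ∨ j % 5 = 2 ∨ j % 5 = 3 ∨ j % 5 = 4 := by omega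
  rcases h with h|h|h|h|h <;>
    simp [gtnA_while, gtnB_digit, gtnB_next, hm, h]

theorem gtn_while_eq (table : List (List Int)) (n : Nat) :
    ∀ (res_v i j : Int),
      gtnA_while table n res_v i j
        = ((gtnB_walk table n i j).foldl (fun v d => v * 10 + d) res_v,
           (gtnIter n i j).1, (gtnIter n i j).2) := by
  induction n with
  | zero => intro res_v i j; simp [gtnA_while, gtnB_walk, gtnIter]
  | succ n ih =>
    intro res_v i j
    rw [gtn_step]
    simp [gtnB_walk, gtnIter, ih]

theorem gtn_walk_length (table : List (List Int)) (n : Nat) :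
    ∀ i j, (gtnB_walk table n i j).length = n := by
  induction n with
  | zero => intro i j; simp [gtnB_walk]
  | succ n ih => intro i j; simp [gtnB_walk, ih]

theorem gtn_walk_add (table : List (List Int)) (m : Nat) :
    ∀ (n : Nat) (i j : Int),
      gtnB_walk table (m + n) i j
        = gtnB_walk table m i j ++ gtnB_walk table n (gtnIter m i j).1 (gtnIter m i j).2 := by
  induction m with
  | zero => intro n i j; simp [gtnB_walk, gtnIter]
  | succ m ih =>
    intro n i j
    have : m + 1 + n = (m + n) + 1 := by omega
    rw [this]
    simp [gtnB_walk, gtnIter, ih]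

theorem gtn_main (table : List (List Int)) (num : Int) (hnum : 0 ≤ num) (c : Nat) :
    ∀ (i j : Int) (res : List Int),
      gtnA_outer table num c res i j
        = res ++ gtnB_pack num ((10:Int) ^ (num - 1).toNat) c (gtnB_walk table (num.toNat * c) i j) := by
  induction c with
  | zero => intro i j res; simp [gtnA_outer, gtnB_pack]
  | succ c ih =>
    intro i j res
    have hsplit : num.toNat * (c + 1) = num.toNat + num.toNat * c := by ring
    rw [hsplit, gtn_walk_add]
    have hchunk : PySem.List.slice
        (gtnB_walk table num.toNat i j ++ gtnB_walk table (num.toNat * c) (gtnIter num.toNat i j).1 (gtnIter num.toNat i j).2)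
        none (some num) = gtnB_walk table num.toNat i j := by
      rw [PySem.List.slice_to _ hnum]
      exact List.take_left' (gtn_walk_length table num.toNat i j)
    have hrest : PySem.List.slice
        (gtnB_walk table num.toNat i j ++ gtnB_walk table (num.toNat * c) (gtnIter num.toNat i j).1 (gtnIter num.toNat i j).2)
        (some num) none = gtnB_walk table (num.toNat * c) (gtnIter num.toNat i j).1 (gtnIter num.toNat i j).2 := by
      rw [PySem.List.slice_from _ hnum]
      exact List.drop_left' (gtn_walk_length table num.toNat i j)
    simp only [gtnA_outer, gtnB_pack, gtn_while_eq, hchunk, hrest]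
    rw [ih]
    simp

-- ===== VERDICT (by name: the statement is the Claim_ definition above) =====
theorem get_table_number_spec : Claim_equal_get_table_number := by
  intro table i j num count _hdom hpre
  unfold Spec_get_table_number get_table_number get_table_number_alt
  by_cases hc : count ≤ 0
  · have : count.toNat = 0 := by omega
    simp [this, hc, gtnA_outer]
  · have hnum : 1 ≤ num := by
      rcases hpre with h | h
      · omega
      · exact h.1
    have hmul : (num * count).toNat = num.toNat * count.toNat := by
      have hcast : num * count = ((num.toNat * count.toNat : Nat) : Int) := by
        push_cast
        rw [Int.toNat_of_nonneg (by omega : (0:Int) ≤ num),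
            Int.toNat_of_nonneg (by omega : (0:Int) ≤ count)]
      rw [hcast, Int.toNat_natCast]
    rw [if_neg hc, hmul]
    exact gtn_main table num (by omega) count.toNat i j []
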